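-- pv_equiv track=rewrite | github.com/Ns81000/RainbowLab | backend/modules/code_auditor.py | compute_security_score
-- ===== SOURCE A (Python) =====
-- def compute_security_score(findings, has_salt, has_pepper) -> int:
--     score = 100
--     for f in findings:
--         if f["severity"] == "CRITICAL":
--             score -= 25
--         elif f["severity"] == "HIGH":
--             score -= 15
--         elif f["severity"] == "MEDIUM":
--             score -= 8
--         elif f["severity"] == "LOW":
--             score -= 3
--
--     if not has_salt and findings:
--         score -= 10
--     if not has_pepper:
--         score -= 3
--
--     return max(0, min(100, score))
-- ===== SOURCE B (Python) =====
-- def compute_security_score(findings, has_salt, has_pepper) -> int: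
--     sev = [f["severity"] for f in findings]
--     score = (100
--              - 25 * sev.count("CRITICAL")
--              - 15 * sev.count("HIGH")
--              - 8 * sev.count("MEDIUM")
--              - 3 * sev.count("LOW"))
--     if not has_salt and sev:
--         score -= 10
--     if not has_pepper:
--         score -= 3
--     return max(0, min(100, score))
-- ===== Notes on version B (the rewrite author's own statement) =====
-- stated objective: alternative
-- what changed: Replaces the per-finding accumulating branch loop by extracting the severity list once and computing the score in closed form from category counts (25/15/8/3 times sev.count of each level).
import Mathlib
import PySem

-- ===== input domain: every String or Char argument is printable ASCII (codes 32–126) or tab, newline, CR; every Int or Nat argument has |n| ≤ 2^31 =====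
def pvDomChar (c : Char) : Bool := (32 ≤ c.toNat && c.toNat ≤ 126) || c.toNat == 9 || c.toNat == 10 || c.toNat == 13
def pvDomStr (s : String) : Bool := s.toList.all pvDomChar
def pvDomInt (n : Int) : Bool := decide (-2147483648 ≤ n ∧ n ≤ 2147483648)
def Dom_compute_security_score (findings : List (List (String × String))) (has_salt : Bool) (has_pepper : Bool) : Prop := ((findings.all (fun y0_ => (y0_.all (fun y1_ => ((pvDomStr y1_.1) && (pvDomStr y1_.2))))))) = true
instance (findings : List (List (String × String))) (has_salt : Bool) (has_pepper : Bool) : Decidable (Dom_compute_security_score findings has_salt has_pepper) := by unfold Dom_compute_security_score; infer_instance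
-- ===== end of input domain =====

-- B replaces A's per-finding accumulating branch loop by a closed-form score over severity-category counts (alternative decomposition, same cost).


-- ===== PORT A =====
-- f["severity"]: first-match lookup in the association list (Pre_ guarantees the key is present, so the default is never read)
def pvSev (f : List (String × String)) : String := (f.lookup "severity").getD ""

def compute_security_score (findings : List (List (String × String))) (has_salt : Bool) (has_pepper : Bool) : Int :=
  let score : Int := findings.foldl (fun score f =>
    if pvSev f = "CRITICAL" then score - 25
    else if pvSev f = "HIGH" then score - 15
    else if pvSev f = "MEDIUM" then score - 8
    else if pvSev f = "LOW" then score - 3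
    else score) 100
  let score := if !has_salt && !findings.isEmpty then score - 10 else score
  let score := if !has_pepper then score - 3 else score
  max 0 (min 100 score)

-- ===== PORT B =====
def compute_security_score_alt (findings : List (List (String × String))) (has_salt : Bool) (has_pepper : Bool) : Int :=
  let sev := findings.map pvSev
  let score : Int := 100
    - 25 * (PySem.List.count sev "CRITICAL")
    - 15 * (PySem.List.count sev "HIGH")
    - 8 * (PySem.List.count sev "MEDIUM")
    - 3 * (PySem.List.count sev "LOW")
  let score := if !has_salt && !sev.isEmpty then score - 10 else score
  let score := if !has_pepper then score - 3 else score
  max 0 (min 100 score)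

-- ===== PRECONDITION & SPEC =====
-- Pre_ excludes exactly the inputs where some finding lacks the "severity" key, on which the Python A raises KeyError.
def Pre_compute_security_score (findings : List (List (String × String))) (has_salt : Bool) (has_pepper : Bool) : Prop :=
  ∀ f ∈ findings, (f.lookup "severity").isSome = true
instance (findings : List (List (String × String))) (has_salt : Bool) (has_pepper : Bool) : Decidable (Pre_compute_security_score findings has_salt has_pepper) := by unfold Pre_compute_security_score; infer_instance
def pvWitness_compute_security_score : (List (List (String × String))) × Bool × Bool :=
  ([[("severity", "HIGH")], [("severity", "LOW"), ("msg", "x")]], true, false)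

def Spec_compute_security_score (findings : List (List (String × String))) (has_salt : Bool) (has_pepper : Bool) (out : Int) : Prop := out = compute_security_score_alt findings has_salt has_pepper
instance (findings : List (List (String × String))) (has_salt : Bool) (has_pepper : Bool) (out : Int) : Decidable (Spec_compute_security_score findings has_salt has_pepper out) := by unfold Spec_compute_security_score; infer_instance

-- ===== CLAIM (what is proved, stated in full; the proofs are below) =====
def Claim_equal_compute_security_score : Prop := ∀ (findings : List (List (String × String))) (has_salt : Bool) (has_pepper : Bool), Dom_compute_security_score findings has_salt has_pepper → Pre_compute_security_score findings has_salt has_pepper → Spec_compute_security_score findings has_salt has_pepper (compute_security_score findings has_salt has_pepper)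

-- ===== LEMMAS AND PROOFS =====
-- A's loop from any start value equals start minus the closed-form penalty over counts.
theorem pv_fold_eq (fs : List (List (String × String))) (s : Int) :
    fs.foldl (fun score f =>
      if pvSev f = "CRITICAL" then score - 25
      else if pvSev f = "HIGH" then score - 15
      else if pvSev f = "MEDIUM" then score - 8
      else if pvSev f = "LOW" then score - 3
      else score) s
    = s - 25 * (PySem.List.count (fs.map pvSev) "CRITICAL")
        - 15 * (PySem.List.count (fs.map pvSev) "HIGH")
        - 8 * (PySem.List.count (fs.map pvSev) "MEDIUM")
        - 3 * (PySem.List.count (fs.map pvSev) "LOW") := by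
  induction fs generalizing s with
  | nil => simp [PySem.List.count]
  | cons f fs ih =>
    simp only [List.foldl_cons, List.map_cons, ih, PySem.List.count, List.count_cons]
    split_ifs with h1 h2 h3 h4 <;>
      simp_all [beq_iff_eq, PySem.List.count] <;> ring

-- ===== VERDICT (by name: the statement is the Claim_ definition above) =====
theorem compute_security_score_spec : Claim_equal_compute_security_score := by
  intro findings has_salt has_pepper _ _
  unfold Spec_compute_security_score compute_security_score compute_security_score_alt
  simp only [pv_fold_eq, List.isEmpty_map]
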